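-- pv_equiv track=rewrite | github.com/newfies-dialer/newfies-dialer | newfies/dialer_cdr/templatetags/dialer_cdr_extras.py | _regroup_table
-- ===== SOURCE A (Python) =====
-- class ArgumentError(ValueError):
--     """Missing or incompatible argument."""
--
-- def _regroup_table(seq, rows=None, columns=None):
--     if not (rows or columns):
--         raise ArgumentError("Missing one of rows or columns")
--
--     if columns:
--         rows = (len(seq) // columns) + 1
--     table = [seq[i::rows] for i in range(rows)]
--
--     # Pad out short rows
--     n = len(table[0])
--     return [row + [None for x in range(n - len(row))] for row in table]
-- ===== SOURCE B (Python) =====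
-- class ArgumentError(ValueError):
--     """Missing or incompatible argument."""
--
-- def _regroup_table(seq, rows=None, columns=None):
--     if not (rows or columns):
--         raise ArgumentError("Missing one of rows or columns")
--
--     if columns:
--         rows = len(seq) // columns + 1
--     # closed form: cell (i, j) is seq[j*rows + i] when that index exists, else None;
--     # the table has ceil(len(seq)/rows) columns -- no slicing, no padding pass
--     L = len(seq)
--     n = -(-L // rows)
--     return [[seq[j * rows + i] if j * rows + i < L else None
--              for j in range(n)]
--             for i in range(rows)]
-- ===== Notes on version B (the rewrite author's own statement) =====
-- stated objective: alternative
-- what changed: Replaces A's build-then-pad pipeline (per-row strided slices seq[i::rows], then a second pass padding short rows with None) by a direct closed-form construction: the column count is computed as ceil(len(seq)/rows) and each cell (i,j) is written once as seq[j*rows+i] if that index exists else None.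
import Mathlib
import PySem

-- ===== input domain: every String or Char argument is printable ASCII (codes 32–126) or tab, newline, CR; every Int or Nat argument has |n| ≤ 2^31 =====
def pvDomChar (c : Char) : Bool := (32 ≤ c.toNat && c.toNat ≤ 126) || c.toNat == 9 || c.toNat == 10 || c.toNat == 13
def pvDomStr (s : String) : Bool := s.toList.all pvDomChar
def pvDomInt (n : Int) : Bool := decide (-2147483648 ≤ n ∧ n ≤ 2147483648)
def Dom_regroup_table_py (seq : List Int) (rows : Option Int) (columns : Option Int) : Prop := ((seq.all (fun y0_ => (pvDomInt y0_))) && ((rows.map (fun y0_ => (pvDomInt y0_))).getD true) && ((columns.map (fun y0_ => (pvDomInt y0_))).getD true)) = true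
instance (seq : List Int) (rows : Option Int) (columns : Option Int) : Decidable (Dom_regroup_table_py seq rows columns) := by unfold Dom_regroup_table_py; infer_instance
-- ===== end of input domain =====

-- B replaces A's build-then-pad pipeline (strided slices, then None-padding) by a direct
-- closed-form table: cell (i,j) = seq[j*rows+i] if in range else None (alternative decomposition, same cost).

-- ===== PORT A =====
-- table = [seq[i::rows] for i in range(rows)]; pad short rows with a None-comprehension up to len(table[0])
def regroup_table_py (seq : List Int) (rows : Option Int) (columns : Option Int) : List (List (Option Int)) :=
  let r : Int := match columns with
    | some c => if c ≠ 0 then PySem.Int.floordiv (seq.length : Int) c + 1 else rows.getD 0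
    | none => rows.getD 0
  let table : List (List Int) :=
    (PySem.List.pyRange 0 r 1).map (fun i => (PySem.List.slice? seq (some i) none r).getD [])
  let n : Int := ((PySem.List.pyGet? table 0).getD []).length
  table.map (fun row => row.map some ++ (PySem.List.pyRange 0 (n - (row.length : Int)) 1).map (fun _ => (none : Option Int)))

-- ===== PORT B =====
-- n = -(-L // rows) columns; cell (i, j) = seq[j*rows+i] if j*rows+i < L else None
def regroup_table_py_alt (seq : List Int) (rows : Option Int) (columns : Option Int) : List (List (Option Int)) :=
  let r : Int := if columns.getD 0 ≠ 0 then PySem.Int.floordiv (seq.length : Int) (columns.getD 0) + 1 else rows.getD 0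
  let L : Int := seq.length
  let n : Int := -(PySem.Int.floordiv (-L) r)
  (PySem.List.pyRange 0 r 1).map (fun i =>
    (PySem.List.pyRange 0 n 1).map (fun j =>
      if j * r + i < L then PySem.List.pyGet? seq (j * r + i) else none))

-- ===== PRECONDITION & SPEC =====
-- Pre_ excludes exactly the inputs where the Python A raises: both rows and columns falsy (ArgumentError),
-- or the effective row count is ≤ 0, so that table is empty and table[0] is an IndexError.
def Pre_regroup_table_py (seq : List Int) (rows : Option Int) (columns : Option Int) : Prop :=
  0 < (match columns with
    | some c => if c ≠ 0 then PySem.Int.floordiv (seq.length : Int) c + 1 else rows.getD 0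
    | none => rows.getD 0)
instance (seq : List Int) (rows : Option Int) (columns : Option Int) : Decidable (Pre_regroup_table_py seq rows columns) := by unfold Pre_regroup_table_py; infer_instance

def pvWitness_regroup_table_py : List Int × Option Int × Option Int := ([1, 2, 3, 4, 5], some 2, none)

def Spec_regroup_table_py (seq : List Int) (rows : Option Int) (columns : Option Int) (out : List (List (Option Int))) : Prop := out = regroup_table_py_alt seq rows columns
instance (seq : List Int) (rows : Option Int) (columns : Option Int) (out : List (List (Option Int))) : Decidable (Spec_regroup_table_py seq rows columns out) := by unfold Spec_regroup_table_py; infer_instance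

-- ===== CLAIM (what is proved, stated in full; the proofs are below) =====
def Claim_equal_regroup_table_py : Prop := ∀ (seq : List Int) (rows : Option Int) (columns : Option Int), Dom_regroup_table_py seq rows columns → Pre_regroup_table_py seq rows columns → Spec_regroup_table_py seq rows columns (regroup_table_py seq rows columns)

-- ===== LEMMAS AND PROOFS =====

-- ceiling division on Nat: the number of columns of the table
def pvCeil (L R : Nat) : Nat := (L + R - 1) / R

theorem pvCeil_mul_ge (L R : Nat) (hR : 0 < R) : L ≤ R * pvCeil L R := by
  unfold pvCeil
  have h := Nat.div_add_mod (L + R - 1) R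
  have hs := Nat.mod_lt (L + R - 1) hR
  omega

theorem pvCeil_lt_mul (L R k : Nat) (hR : 0 < R) (hk : k < pvCeil L R) : R * k < L := by
  unfold pvCeil at hk
  have h1 : R * ((L + R - 1) / R) ≤ L + R - 1 := Nat.mul_div_le _ _
  have h2 : R * (k + 1) ≤ R * ((L + R - 1) / R) := Nat.mul_le_mul_left R (by omega)
  have h3 : R * (k + 1) = R * k + R := by ring
  omega

theorem pvCeil_mono (L L' R : Nat) (h : L ≤ L') : pvCeil L R ≤ pvCeil L' R := by
  unfold pvCeil; exact Nat.div_le_div_right (by omega)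

-- the elements a positive-step slice seq[i::R] picks, written over Nat indices
def pvG (R : Nat) (ys : List Int) : List Int :=
  (List.range ((ys.length + R - 1) / R)).filterMap (fun k => ys[R * k]?)

theorem pvSliceG (R : Nat) (hR : 0 < R) (seq : List Int) (i : Nat) :
    PySem.List.slice? seq (some (i : Int)) none (R : Int) = some (pvG R (seq.drop i)) := by
  unfold pvG PySem.List.slice? PySem.List.sliceIndices
  have h2 : ¬ ((R:Int) < 0) := by omega
  simp [h2]
  refine ⟨by omega, ?_⟩
  have h3 : ¬ ((i:Int) < 0) := by omega
  simp only [if_neg h3, if_pos hR]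
  by_cases h4 : i ≤ seq.length
  · have hmin : min ((i:Int)) ((seq.length:Nat) : Int) = (i:Int) := min_eq_left (by exact_mod_cast h4)
    rw [hmin]
    have hfun : (fun x : Nat => seq[((i:Int) + (R:Int) * (x:Int)).toNat]?) =
        (fun x : Nat => seq[i + R * x]?) := by
      funext x
      have hh : ((i:Int) + (R:Int) * (x:Int)).toNat = i + R * x := by
        have hc : ((i:Int) + (R:Int) * (x:Int)) = ((i + R * x : Nat) : Int) := by push_cast; ring
        rw [hc, Int.toNat_natCast]
      rw [hh]
    rw [hfun]
    congr 2
    · by_cases h5 : ((i:Int)) < ((seq.length : Nat) : Int)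
      · rw [if_pos h5]
        have hcast : ((seq.length : Int) - (i:Int) + (R:Int) - 1) = ((seq.length - i + R - 1 : Nat) : Int) := by
          omega
        rw [hcast, ← Int.natCast_div, Int.toNat_natCast]
      · rw [if_neg h5]
        rw [show seq.length - i = 0 from by omega, Nat.zero_add]
        exact (Nat.div_eq_of_lt (by omega)).symm
  · have hmin : min ((i:Int)) ((seq.length:Nat) : Int) = ((seq.length : Nat) : Int) :=
      min_eq_right (by exact_mod_cast (by omega : seq.length ≤ i))
    rw [hmin]
    rw [if_neg (by omega)]
    rw [show seq.length - i = 0 from by omega, Nat.zero_add, Nat.div_eq_of_lt (by omega)]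
    simp

-- an all-some filterMap, mapped with some, is the map itself
theorem pvFilterMapSome {α β : Type} (g : α → Option β) (l : List α)
    (h : ∀ a ∈ l, (g a).isSome) : (l.filterMap g).map some = l.map g := by
  induction l with
  | nil => rfl
  | cons x xs ih =>
    have hx := h x (by simp)
    obtain ⟨b, hb⟩ := Option.isSome_iff_exists.mp hx
    simp [hb, ih (fun a ha => h a (by simp [ha]))]

theorem pvG_map_some (R : Nat) (hR : 0 < R) (ys : List Int) :
    (pvG R ys).map some = (List.range (pvCeil ys.length R)).map (fun k => ys[R * k]?) := by
  unfold pvG pvCeil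
  apply pvFilterMapSome
  intro k hk
  rw [List.mem_range] at hk
  have := pvCeil_lt_mul ys.length R k hR hk
  rw [List.getElem?_eq_getElem this]
  rfl

theorem pvG_length (R : Nat) (hR : 0 < R) (ys : List Int) :
    (pvG R ys).length = pvCeil ys.length R := by
  have := congrArg List.length (pvG_map_some R hR ys)
  simpa using this

-- a run of indices past the data maps to none
theorem pvTailNone (f : Nat → Option Int) (a b : Nat) (h : ∀ t, f (a + t) = none) :
    (List.range b).map (fun t => f (a + t)) = List.replicate b (none : Option Int) := by
  rw [List.map_congr_left (fun t _ => h t), List.map_const']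
  simp

-- A's padded row i equals the closed-form row
theorem pvRowEq (R : Nat) (hR : 0 < R) (seq : List Int) (i : Nat) :
    (pvG R (seq.drop i)).map some ++
      List.replicate (((pvCeil seq.length R : Nat) : Int) - ((pvG R (seq.drop i)).length : Int)).toNat (none : Option Int)
    = (List.range (pvCeil seq.length R)).map (fun j => seq[i + R * j]?) := by
  set L := seq.length with hL
  have hlen : (seq.drop i).length = L - i := by simp [hL]
  set Ci := pvCeil (L - i) R with hCi
  have hmap : (pvG R (seq.drop i)).map some = (List.range Ci).map (fun k => seq[i + R * k]?) := by
    rw [pvG_map_some R hR, hlen]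
    apply List.map_congr_left
    intro k _
    rw [List.getElem?_drop]
  have hlenG : (pvG R (seq.drop i)).length = Ci := by rw [pvG_length R hR, hlen]
  have hle : Ci ≤ pvCeil L R := by rw [hCi]; exact pvCeil_mono _ _ _ (by omega)
  have htoNat : (((pvCeil L R : Nat) : Int) - ((pvG R (seq.drop i)).length : Int)).toNat = pvCeil L R - Ci := by
    rw [hlenG]; omega
  rw [hmap, htoNat]
  have hsplit : List.range (pvCeil L R) = List.range Ci ++ (List.range (pvCeil L R - Ci)).map (fun x => Ci + x) := by
    rw [← List.range_add]
    congr 1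
    omega
  rw [hsplit, List.map_append, List.map_map]
  congr 1
  rw [show ((fun j => seq[i + R * j]?) ∘ fun x => Ci + x) = fun t => (fun j => seq[i + R * j]?) (Ci + t) from rfl]
  symm
  apply pvTailNone (fun j => seq[i + R * j]?) Ci (pvCeil L R - Ci)
  intro t
  have h1 : L - i ≤ R * Ci := by rw [hCi]; exact pvCeil_mul_ge (L - i) R hR
  have h2 : R * (Ci + t) = R * Ci + R * t := by ring
  apply List.getElem?_eq_none
  omega

-- B's column count -(-L // R) is the Nat ceiling
theorem pvCeilInt (L R : Nat) (hR : 0 < R) :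
    -(PySem.Int.floordiv (-(L : Int)) (R : Int)) = ((pvCeil L R : Nat) : Int) := by
  rw [PySem.Int.neg_floordiv_neg_eq_iff_of_pos (by exact_mod_cast hR)]
  have h1 : L ≤ R * pvCeil L R := pvCeil_mul_ge L R hR
  have h2 : R * pvCeil L R ≤ L + R - 1 := by unfold pvCeil; exact Nat.mul_div_le _ _
  have h1' : (L : Int) ≤ (R : Int) * (pvCeil L R : Int) := by exact_mod_cast h1
  have h2' : (R : Int) * (pvCeil L R : Int) ≤ (L : Int) + (R : Int) - 1 := by
    have : ((R * pvCeil L R : Nat) : Int) ≤ ((L + R - 1 : Nat) : Int) := by exact_mod_cast h2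
    push_cast at this
    omega
  constructor
  · have he : ((pvCeil L R : Int) - 1) * (R : Int) = (R : Int) * (pvCeil L R : Int) - R := by ring
    rw [he]
    omega
  · have he : ((pvCeil L R : Int)) * (R : Int) = (R : Int) * (pvCeil L R : Int) := by ring
    rw [he]
    omega

-- the closed-form row, as B computes it
theorem pvAltRowEq (R : Nat) (seq : List Int) (i : Nat) :
    (List.range (pvCeil seq.length R)).map (fun j =>
        if ((j : Nat) : Int) * (R : Int) + ((i : Nat) : Int) < (seq.length : Int)
        then PySem.List.pyGet? seq (((j : Nat) : Int) * (R : Int) + ((i : Nat) : Int)) else none)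
    = (List.range (pvCeil seq.length R)).map (fun j => seq[i + R * j]?) := by
  apply List.map_congr_left
  intro j _
  have hcast : ((j : Nat) : Int) * (R : Int) + ((i : Nat) : Int) = ((i + R * j : Nat) : Int) := by
    push_cast; ring
  by_cases h : ((j : Nat) : Int) * (R : Int) + ((i : Nat) : Int) < (seq.length : Int)
  · rw [if_pos h, hcast, PySem.List.pyGet?_natCast]
  · rw [if_neg h]
    symm
    apply List.getElem?_eq_none
    rw [hcast] at h
    exact_mod_cast not_lt.mp h

-- None-padding comprehension is a replicate
theorem pvPadEq (m : Int) :
    (PySem.List.pyRange 0 m 1).map (fun _ => (none : Option Int)) = List.replicate m.toNat (none : Option Int) := by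
  rw [PySem.List.pyRange_one, List.map_map]
  simp [Function.comp_def, List.map_const']

-- the two port bodies agree for any positive effective row count r
theorem pvBodyEq (seq : List Int) (r : Int) (hr : 0 < r) :
    (let table : List (List Int) :=
      (PySem.List.pyRange 0 r 1).map (fun i => (PySem.List.slice? seq (some i) none r).getD []);
     let n : Int := ((PySem.List.pyGet? table 0).getD []).length;
     table.map (fun row => row.map some ++ (PySem.List.pyRange 0 (n - (row.length : Int)) 1).map (fun _ => (none : Option Int))))
    =
    (let L : Int := seq.length;
     let n : Int := -(PySem.Int.floordiv (-L) r);
     (PySem.List.pyRange 0 r 1).map (fun i =>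
       (PySem.List.pyRange 0 n 1).map (fun j =>
         if j * r + i < L then PySem.List.pyGet? seq (j * r + i) else none))) := by
  obtain ⟨R, rfl⟩ : ∃ R : Nat, r = (R : Int) := ⟨r.toNat, (Int.toNat_of_nonneg (le_of_lt hr)).symm⟩
  have hR : 0 < R := by exact_mod_cast hr
  simp only
  have htable : (PySem.List.pyRange 0 (R : Int) 1).map (fun i => (PySem.List.slice? seq (some i) none (R : Int)).getD []) =
      (List.range R).map (fun k => pvG R (seq.drop k)) := by
    rw [PySem.List.pyRange_zero_nat, List.map_map]
    apply List.map_congr_left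
    intro k _
    show (PySem.List.slice? seq (some ((k : Nat) : Int)) none (R : Int)).getD [] = _
    rw [pvSliceG R hR seq k]
    rfl
  rw [htable]
  have hhead : PySem.List.pyGet? ((List.range R).map (fun k => pvG R (seq.drop k))) 0 = some (pvG R seq) := by
    have h0 : ((0 : Int)) = ((0 : Nat) : Int) := rfl
    rw [h0, PySem.List.pyGet?_natCast]
    rw [List.getElem?_eq_getElem (by simpa using hR)]
    simp
  rw [hhead]
  rw [pvCeilInt seq.length R hR]
  rw [PySem.List.pyRange_zero_nat R, List.map_map, List.map_map]
  apply List.map_congr_left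
  intro i _
  simp only [Function.comp_def, Option.getD_some]
  rw [pvG_length R hR seq]
  rw [pvPadEq]
  rw [pvRowEq R hR seq i]
  rw [PySem.List.pyRange_zero_nat (pvCeil seq.length R), List.map_map]
  simp only [Function.comp_def]
  exact (pvAltRowEq R seq i).symm

-- ===== VERDICT (by name: the statement is the Claim_ definition above) =====
theorem regroup_table_py_spec : Claim_equal_regroup_table_py := by
  intro seq rows columns _ hpre
  unfold Spec_regroup_table_py regroup_table_py regroup_table_py_alt
  unfold Pre_regroup_table_py at hpre
  cases columns with
  | none => exact pvBodyEq seq _ hpre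
  | some c => exact pvBodyEq seq _ hpre
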